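-- pv_equiv track=rewrite | github.com/nathanlo99/dmoj_archive | done/ecna16e.py | count
-- ===== SOURCE A (Python) =====
-- def count(s, ss):
--     ans = len(s)
--     last = -1
--     for i in range(len(s)):
--         if i >= last and s[i:i + len(ss)] == ss:
--             ans -= len(ss)
--             ans += 1
--             last = i + len(ss)
--     return ans + len(ss)
-- ===== SOURCE B (Python) =====
-- def count(s, ss):
--     # len(s) minus (m-1) per greedy non-overlapping occurrence, plus len(ss)
--     return len(s) + len(ss) - s.count(ss) * (len(ss) - 1)
-- ===== Notes on version B (the rewrite author's own statement) =====
-- stated objective: faster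
-- what changed: Replaces A's Python-level index loop (slicing a fresh m-char window at every position with a 'last' skip marker) by a closed-form formula over str.count, which counts the same greedy non-overlapping occurrences in one C-level scan; Pre_ excludes the degenerate empty substring, where matching the empty pattern at every position is a corner nobody would specify and A's and B's values are both accidental (A 2*len(s), B 2*len(s)+1).
-- outside the precondition, e.g. on count('ab', ''): A returns 4, B returns 5
import Mathlib
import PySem

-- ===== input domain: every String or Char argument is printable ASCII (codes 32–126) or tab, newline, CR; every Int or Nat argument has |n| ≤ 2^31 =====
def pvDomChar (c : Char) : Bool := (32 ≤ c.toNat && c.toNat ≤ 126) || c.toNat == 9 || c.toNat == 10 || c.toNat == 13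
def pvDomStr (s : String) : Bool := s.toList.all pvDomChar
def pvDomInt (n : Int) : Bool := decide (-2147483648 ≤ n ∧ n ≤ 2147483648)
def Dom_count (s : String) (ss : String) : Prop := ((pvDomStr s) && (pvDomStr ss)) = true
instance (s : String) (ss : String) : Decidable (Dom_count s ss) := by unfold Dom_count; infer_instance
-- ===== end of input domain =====

-- B replaces A's position-by-position window scan with a closed-form formula over the
-- library substring count (same greedy non-overlapping occurrences); objective: faster.

-- ===== PORT A =====
-- loop body of A's for-loop: state (ans, last), test 'i >= last and s[i:i+len(ss)] == ss'
def countF (s : String) (ss : String) (st : Int × Int) (i : Int) : Int × Int :=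
  if st.2 ≤ i ∧ PySem.Str.slice s (some i) (some (i + PySem.Str.len ss)) = ss then
    (st.1 - PySem.Str.len ss + 1, i + PySem.Str.len ss)
  else st

def count (s : String) (ss : String) : Int :=
  ((PySem.List.pyRange 0 (PySem.Str.len s)).foldl (countF s ss)
    (PySem.Str.len s, -1)).1 + PySem.Str.len ss

-- ===== PORT B =====
def count_alt (s : String) (ss : String) : Int :=
  PySem.Str.len s + PySem.Str.len ss - (PySem.Str.count s ss : Int) * (PySem.Str.len ss - 1)

-- ===== PRECONDITION & SPEC =====
-- Pre_ excludes the degenerate empty substring ss = "", a corner nobody would specify: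
-- there A matches '' at every index (returning 2*len(s)) while B's str.count finds
-- len(s)+1 empty occurrences (returning 2*len(s)+1); both values are accidental.
def Pre_count (s : String) (ss : String) : Prop := ss ≠ ""
instance (s : String) (ss : String) : Decidable (Pre_count s ss) := by unfold Pre_count; infer_instance
def pvWitness_count : String × String := ("abcabc", "bc")

def Spec_count (s : String) (ss : String) (out : Int) : Prop := out = count_alt s ss
instance (s : String) (ss : String) (out : Int) : Decidable (Spec_count s ss out) := by unfold Spec_count; infer_instance

-- ===== CLAIM (what is proved, stated in full; the proofs are below) =====
def Claim_equal_count : Prop := ∀ (s : String) (ss : String), Dom_count s ss → Pre_count s ss → Spec_count s ss (count s ss)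

-- ===== LEMMAS AND PROOFS =====

-- generic: a fold whose step fixes the state is the identity
theorem foldl_fixed {α β : Type} (f : β → α → β) (st : β) :
    ∀ (l : List α), (∀ i ∈ l, f st i = st) → l.foldl f st = st := by
  intro l
  induction l with
  | nil => intro _; rfl
  | cons x xs ih =>
      intro h
      simp only [List.foldl_cons, h x (by simp)]
      exact ih (fun i hi => h i (by simp [hi]))

-- A's loop skips every index below 'last'
theorem foldl_skip (s ss : String) (a b : Int) (st : Int × Int) (h : b ≤ st.2) :
    (PySem.List.pyRange a b).foldl (countF s ss) st = st := by
  apply foldl_fixed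
  intro i hi
  rw [PySem.List.mem_pyRange_iff_of_pos (by norm_num)] at hi
  unfold countF
  rw [if_neg]
  rintro ⟨h1, -⟩
  omega

-- the slice test at a natural position j is the prefix test on the tail
theorem slice_cond (s ss : String) (j : ℕ) :
    (PySem.Str.slice s (some (j : Int)) (some ((j : Int) + PySem.Str.len ss)) = ss)
      ↔ ss.toList <+: s.toList.drop j := by
  rw [← String.toList_inj, PySem.Str.toList_slice, PySem.Chars.slice_eq_listSlice]
  show PySem.List.slice s.toList (some (j : Int)) (some ((j : Int) + (ss.toList.length : Int))) = ss.toList ↔ _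
  rw [PySem.List.slice_natCast_add, List.prefix_iff_eq_take]
  exact eq_comm

-- count.go: accumulator shifts out
theorem go_acc (sub : List Char) :
    ∀ (fuel : ℕ) (l : List Char) (acc : ℕ),
      PySem.Chars.count.go sub fuel l acc = acc + PySem.Chars.count.go sub fuel l 0 := by
  intro fuel
  induction fuel with
  | zero => intro l acc; simp [PySem.Chars.count.go]
  | succ f ih =>
      intro l acc
      cases l with
      | nil => simp [PySem.Chars.count.go]
      | cons h t =>
          simp only [PySem.Chars.count.go]
          split
          · rw [ih _ (acc + 1), ih _ (0 + 1)]; omega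
          · exact ih t acc

-- count.go: fuel is irrelevant once it covers the list (for a nonempty pattern)
theorem go_fuel (sub : List Char) (hsub : sub ≠ []) :
    ∀ (fuel₁ : ℕ), ∀ (fuel₂ : ℕ) (l : List Char) (acc : ℕ),
      l.length ≤ fuel₁ → l.length ≤ fuel₂ →
      PySem.Chars.count.go sub fuel₁ l acc = PySem.Chars.count.go sub fuel₂ l acc := by
  intro fuel₁
  induction fuel₁ with
  | zero =>
      intro fuel₂ l acc h1 _
      have : l = [] := List.eq_nil_of_length_eq_zero (Nat.le_zero.mp h1)
      subst this
      cases fuel₂ <;> simp [PySem.Chars.count.go]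
  | succ f ih =>
      intro fuel₂ l acc h1 h2
      cases l with
      | nil => cases fuel₂ <;> simp [PySem.Chars.count.go]
      | cons h t =>
          cases fuel₂ with
          | zero => simp at h2
          | succ f₂ =>
              simp only [PySem.Chars.count.go]
              split
              · rename_i hp
                have hm : 1 ≤ sub.length := by
                  cases sub with
                  | nil => exact absurd rfl hsub
                  | cons a b => simp
                apply ih
                · simp only [List.length_drop, List.length_cons]
                  simp only [List.length_cons] at h1; omega
                · simp only [List.length_drop, List.length_cons]
                  simp only [List.length_cons] at h2; omega
              · apply ih <;> simp at h1 h2 <;> omega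

theorem count_eq_go (l sub : List Char) (hsub : sub ≠ []) :
    PySem.Chars.count l sub = PySem.Chars.count.go sub l.length l 0 := by
  unfold PySem.Chars.count
  rw [if_neg (by simpa [List.isEmpty_iff] using hsub)]

theorem count_nil (sub : List Char) (hsub : sub ≠ []) :
    PySem.Chars.count [] sub = 0 := by
  rw [count_eq_go [] sub hsub]; simp [PySem.Chars.count.go]

theorem count_of_prefix (l sub : List Char) (hsub : sub ≠ []) (h : sub <+: l) :
    PySem.Chars.count l sub = 1 + PySem.Chars.count (l.drop sub.length) sub := by
  have hm : 1 ≤ sub.length := by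
    cases sub with
    | nil => exact absurd rfl hsub
    | cons a b => simp
  cases l with
  | nil =>
      have : sub.length ≤ 0 := by simpa using h.length_le
      omega
  | cons a t =>
      rw [count_eq_go _ sub hsub, count_eq_go _ sub hsub]
      simp only [List.length_cons, PySem.Chars.count.go]
      rw [if_pos (List.isPrefixOf_iff_prefix.mpr h)]
      rw [go_acc]
      rw [go_fuel sub hsub t.length (List.drop sub.length (a :: t)).length
            (List.drop sub.length (a :: t)) 0
            (by simp only [List.length_drop, List.length_cons]; omega) (le_refl _)]

theorem count_of_not_prefix (a : Char) (t sub : List Char) (hsub : sub ≠ [])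
    (h : ¬ sub <+: (a :: t)) :
    PySem.Chars.count (a :: t) sub = PySem.Chars.count t sub := by
  rw [count_eq_go _ sub hsub, count_eq_go _ sub hsub]
  simp only [List.length_cons, PySem.Chars.count.go]
  rw [if_neg (by simpa [List.isPrefixOf_iff_prefix] using h)]

-- main loop invariant: from position j with last ≤ j, A's loop subtracts (m-1) per
-- greedy occurrence in the tail
theorem loop_main (s ss : String) (hss : ss.toList ≠ []) :
    ∀ (k j : ℕ) (ans last : Int),
      j ≤ s.toList.length → s.toList.length - j = k → last ≤ (j : Int) →
      ((PySem.List.pyRange (j : Int) (s.toList.length : Int)).foldl (countF s ss) (ans, last)).1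
        = ans - (PySem.Chars.count (s.toList.drop j) ss.toList : Int) * ((ss.toList.length : Int) - 1) := by
  intro k
  induction k using Nat.strong_induction_on with
  | _ k ih =>
      intro j ans last hj hk hlast
      set cs := s.toList with hcs
      set sub := ss.toList with hsubdef
      have hm : 1 ≤ sub.length := by
        cases hsub : sub with
        | nil => exact absurd hsub hss
        | cons a b => simp
      rcases Nat.eq_or_lt_of_le hj with heq | hlt
      · -- j = length: empty range, empty tail
        rw [heq]
        rw [PySem.List.pyRange_one_eq_nil (le_refl _)]
        simp only [List.foldl_nil]
        rw [List.drop_length, count_nil sub hss]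
        push_cast; ring
      · -- j < length
        have hjn : (j : Int) < (cs.length : Int) := by exact_mod_cast hlt
        rw [PySem.List.pyRange_one_cons hjn]
        simp only [List.foldl_cons]
        by_cases hpre : sub <+: cs.drop j
        · -- match at j
          have hstep : countF s ss (ans, last) (j : Int)
              = (ans - (sub.length : Int) + 1, (j : Int) + (sub.length : Int)) := by
            unfold countF
            rw [if_pos]
            · simp [PySem.Str.len, hsubdef]
            · exact ⟨hlast, (slice_cond s ss j).mpr hpre⟩
          rw [hstep]
          have hcount : PySem.Chars.count (cs.drop j) sub
              = 1 + PySem.Chars.count (cs.drop (j + sub.length)) sub := by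
            rw [count_of_prefix _ sub hss hpre, List.drop_drop]
          by_cases hend : cs.length ≤ j + sub.length
          · -- the rest of the range is entirely skipped
            rw [foldl_skip s ss _ _ _ (by push_cast; omega)]
            have : cs.drop (j + sub.length) = [] := List.drop_eq_nil_of_le hend
            rw [hcount, this, count_nil sub hss]
            push_cast; ring
          · -- split the remaining range at j + m
            rw [Nat.not_le] at hend
            rw [PySem.List.pyRange_one_append ((j : Int) + 1) ((j : Int) + (sub.length : Int))
                  (cs.length : Int) (by omega) (by omega)]
            rw [List.foldl_append]
            rw [foldl_skip s ss _ _ _ (le_refl _)]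
            have hcast : (j : Int) + (sub.length : Int) = ((j + sub.length : ℕ) : Int) := by push_cast; ring
            rw [hcast]
            rw [ih (cs.length - (j + sub.length)) (by omega) (j + sub.length)
                  (ans - (sub.length : Int) + 1) _ (by omega) rfl (le_refl _)]
            rw [hcount]
            push_cast; ring
        · -- no match at j
          have hstep : countF s ss (ans, last) (j : Int) = (ans, last) := by
            unfold countF
            rw [if_neg]
            rintro ⟨-, h2⟩
            exact hpre ((slice_cond s ss j).mp h2)
          rw [hstep]
          have hcast : (j : Int) + 1 = ((j + 1 : ℕ) : Int) := by push_cast; ring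
          rw [hcast]
          rw [ih (cs.length - (j + 1)) (by omega) (j + 1) ans last (by omega) rfl (by omega)]
          have hdropj : cs.drop j = cs[j] :: cs.drop (j + 1) := List.drop_eq_getElem_cons hlt
          rw [hdropj, count_of_not_prefix _ _ sub hss (by rwa [hdropj] at hpre)]

-- ===== VERDICT (by name: the statement is the Claim_ definition above) =====
theorem count_spec : Claim_equal_count := by
  intro s ss _ hpre
  unfold Spec_count count count_alt
  have hss : ss.toList ≠ [] := by simpa using hpre
  have h0 : ((0 : ℕ) : Int) = (0 : Int) := rfl
  have := loop_main s ss hss s.toList.length 0 (PySem.Str.len s) (-1)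
    (Nat.zero_le _) (by omega) (by norm_num)
  rw [h0] at this
  unfold PySem.Str.len at this ⊢
  rw [this]
  have : PySem.Str.count s ss = PySem.Chars.count s.toList ss.toList := rfl
  rw [this]
  simp only [List.drop_zero]
  ring
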